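-- pv_equiv track=rewrite | github.com/Polakiewicz1991/python | LeetCode/Challenge/2101. Detonate the Maximum Bombs.py | maximumDetonationInt
-- ===== SOURCE A (Python) =====
-- from typing import List
--
-- def maximumDetonationInt(bombs: List[List[int]]) -> int:
--     graph = [[] for _ in bombs]
--     for i, (xi, yi, ri) in enumerate(bombs):
--         for j, (xj, yj, rj) in enumerate(bombs):
--             if i < j:
--                 dist2 = (xi - xj) ** 2 + (yi - yj) ** 2
--                 if dist2 <= ri ** 2:
--                     graph[i].append(j)
--                 if dist2 <= rj ** 2:
--                     graph[j].append(i)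
--
--     def fn(x):
--         ans = 1
--         seen = {x}
--         stack = [x]
--         while stack:
--             u = stack.pop()
--             for v in graph[u]:
--                 if v not in seen:
--                     ans += 1
--                     seen.add(v)
--                     stack.append(v)
--         return ans
--
--     return max(fn(x) for x in range(len(bombs)))
-- ===== SOURCE B (Python) =====
-- from typing import List
--
-- def maximumDetonationInt(bombs: List[List[int]]) -> int:
--     n = len(bombs)
--     nbr = []
--     for (xi, yi, ri) in bombs:
--         nbr.append({j for j, (xj, yj, rj) in enumerate(bombs)
--                     if (xi - xj) ** 2 + (yi - yj) ** 2 <= ri * ri})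
--     best = 0
--     for x in range(n):
--         s = {x}
--         for _ in range(n):
--             t = s
--             for u in range(n):
--                 if u in s:
--                     t = t | nbr[u]
--             s = t
--         best = max(best, len(s))
--     return best
-- ===== Notes on version B (the rewrite author's own statement) =====
-- stated objective: alternative
-- what changed: Per-source stack DFS with a visited set is replaced by n rounds of whole-set neighbour-saturation over precomputed neighbour sets (no stack, no per-node bookkeeping); the graph is built by one symmetric double loop into neighbour sets instead of A's i<j asymmetric adjacency-list construction.
-- outside the precondition, e.g. on maximumDetonationInt([]): A raises ValueError, B returns 0
import Mathlib
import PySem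

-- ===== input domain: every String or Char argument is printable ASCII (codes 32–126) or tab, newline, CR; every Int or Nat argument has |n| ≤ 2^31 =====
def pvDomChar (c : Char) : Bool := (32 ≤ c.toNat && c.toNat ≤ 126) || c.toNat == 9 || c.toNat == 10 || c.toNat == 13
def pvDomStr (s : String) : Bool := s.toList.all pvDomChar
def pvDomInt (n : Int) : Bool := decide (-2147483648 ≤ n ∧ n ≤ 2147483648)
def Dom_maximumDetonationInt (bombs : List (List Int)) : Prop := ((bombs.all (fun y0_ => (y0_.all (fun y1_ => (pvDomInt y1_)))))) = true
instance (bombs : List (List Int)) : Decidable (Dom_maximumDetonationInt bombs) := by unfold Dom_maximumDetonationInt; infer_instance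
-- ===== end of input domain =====

-- B replaces per-source stack DFS by n rounds of whole-set neighbour saturation over
-- precomputed neighbour sets (alternative decomposition of the same reachability computation).


-- ===== PORT A =====

-- '(xi, yi, ri) = bomb' (Pre_ guarantees length 3, where Python's unpacking succeeds)
def pvUnpack3 (b : List Int) : Int × Int × Int :=
  match b with
  | [x, y, r] => (x, y, r)
  | _ => (0, 0, 0)

-- graph[a].append(b)
def pvAddEdge (g : List (List Nat)) (a b : Nat) : List (List Nat) :=
  g.modify a (· ++ [b])

-- body of A's double loop for the index pair (i, j)
def pvGraphBody (bombs : List (List Int)) (g : List (List Nat)) (i j : Nat) : List (List Nat) :=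
  if i < j then
    let p := pvUnpack3 (bombs.getD i [])
    let q := pvUnpack3 (bombs.getD j [])
    let dist2 := (p.1 - q.1) ^ 2 + (p.2.1 - q.2.1) ^ 2
    let g1 := if dist2 ≤ p.2.2 ^ 2 then pvAddEdge g i j else g
    if dist2 ≤ q.2.2 ^ 2 then pvAddEdge g1 j i else g1
  else g

def pvGraph (bombs : List (List Int)) : List (List Nat) :=
  let n := bombs.length
  (List.range n).foldl
    (fun g i => (List.range n).foldl (fun g j => pvGraphBody bombs g i j) g)
    (List.replicate n [])

-- A's 'while stack:' loop; the Lean stack holds Python's stack reversed (head = top), so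
-- 'stack.pop()' is the head and 'stack.append(v)' is 'v :: ·'.  The fuel only bounds the
-- iteration count (each iteration pops once and pushes ≤ |unseen| elements, so
-- n+1 iterations always suffice — proved below); it changes no computed value.
def pvFnLoop (g : List (List Nat)) : Nat → List Nat → PySem.Set Nat → Int → Int
  | 0, _, _, ans => ans
  | _ + 1, [], _, ans => ans
  | fuel + 1, u :: rest, seen, ans =>
      let st := (g.getD u []).foldl
        (fun (acc : Int × PySem.Set Nat × List Nat) v =>
          if PySem.Set.contains acc.2.1 v then acc
          else (acc.1 + 1, PySem.Set.add acc.2.1 v, v :: acc.2.2))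
        (ans, seen, rest)
      pvFnLoop g fuel st.2.2 st.2.1 st.1

-- def fn(x)
def pvFn (g : List (List Nat)) (fuel : Nat) (x : Nat) : Int :=
  pvFnLoop g fuel [x] (PySem.Set.ofList [x]) 1

def maximumDetonationInt (bombs : List (List Int)) : Int :=
  let n := bombs.length
  let g := pvGraph bombs
  let vals := (List.range n).map (fun x => pvFn g (n + 1) x)
  -- max(fn(x) for x in range(len(bombs))): none (ValueError on empty) is excluded by Pre_
  (PySem.List.max? vals (fun v => v)).getD 0

-- ===== PORT B =====

-- '(xi-xj)**2 + (yi-yj)**2 <= ri*ri' for rows u, v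
def pvHit (bombs : List (List Int)) (u v : Nat) : Bool :=
  let p := pvUnpack3 (bombs.getD u [])
  let q := pvUnpack3 (bombs.getD v [])
  decide ((p.1 - q.1) ^ 2 + (p.2.1 - q.2.1) ^ 2 ≤ p.2.2 * p.2.2)

-- nbr[i] = {j for j,(xj,yj,rj) in enumerate(bombs) if dist2 <= ri*ri}
def pvNbr (bombs : List (List Int)) : List (PySem.Set Nat) :=
  (List.range bombs.length).map
    (fun i => PySem.Set.ofList ((List.range bombs.length).filter (fun j => pvHit bombs i j)))

-- one saturation round: t = s; for u in range(n): if u in s: t = t | nbr[u]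
def pvRound (nbr : List (PySem.Set Nat)) (n : Nat) (s : PySem.Set Nat) : PySem.Set Nat :=
  (List.range n).foldl
    (fun t u => if PySem.Set.contains s u then PySem.Set.union t (nbr.getD u []) else t) s

def maximumDetonationInt_alt (bombs : List (List Int)) : Int :=
  let n := bombs.length
  let nbr := pvNbr bombs
  (List.range n).foldl
    (fun best x =>
      let s := (List.range n).foldl (fun s _ => pvRound nbr n s) (PySem.Set.ofList [x])
      max best (PySem.Set.len s))
    0

-- ===== PRECONDITION & SPEC =====

-- Pre_ excludes exactly the inputs where A raises: bombs = [] (ValueError from max() of an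
-- empty generator) and rows not of length 3 (ValueError from tuple unpacking).
def Pre_maximumDetonationInt (bombs : List (List Int)) : Prop :=
  bombs ≠ [] ∧ ∀ b ∈ bombs, b.length = 3
instance (bombs : List (List Int)) : Decidable (Pre_maximumDetonationInt bombs) := by
  unfold Pre_maximumDetonationInt; infer_instance

def pvWitness_maximumDetonationInt : List (List Int) := [[0, 0, 1], [1, 0, 0]]

def Spec_maximumDetonationInt (bombs : List (List Int)) (out : Int) : Prop :=
  out = maximumDetonationInt_alt bombs
instance (bombs : List (List Int)) (out : Int) : Decidable (Spec_maximumDetonationInt bombs out) := by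
  unfold Spec_maximumDetonationInt; infer_instance

-- ===== CLAIM (what is proved, stated in full; the proofs are below) =====
def Claim_equal_maximumDetonationInt : Prop :=
  ∀ (bombs : List (List Int)), Dom_maximumDetonationInt bombs →
    Pre_maximumDetonationInt bombs →
    Spec_maximumDetonationInt bombs (maximumDetonationInt bombs)

-- ===== LEMMAS AND PROOFS =====

-- The common semantic object: one expansion step of the reachable set, and its n-fold iterate.
def pvStep (g : List (List Nat)) (n : Nat) (S : Finset ℕ) : Finset ℕ :=
  S ∪ (Finset.range n).filter (fun v => ∃ u ∈ S, v ∈ g.getD u [])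

def pvC (g : List (List Nat)) (n x : Nat) : Finset ℕ := (pvStep g n)^[n] {x}

theorem pvAddEdge_length (g : List (List Nat)) (a b : Nat) :
    (pvAddEdge g a b).length = g.length := by
  simp [pvAddEdge]

theorem pvAddEdge_mem (g : List (List Nat)) (a b u v : Nat) :
    v ∈ (pvAddEdge g a b).getD u [] ↔ v ∈ g.getD u [] ∨ (u = a ∧ a < g.length ∧ v = b) := by
  simp only [pvAddEdge, List.getD_eq_getElem?_getD, List.getElem?_modify]
  rcases h2 : g[u]? with _ | row
  · have : ¬ u < g.length := by simpa [List.getElem?_eq_none_iff] using h2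
    by_cases h : a = u <;> simp [h] <;> omega
  · have hlt : u < g.length := by
      by_contra hc
      rw [List.getElem?_eq_none (by omega)] at h2; cases h2
    by_cases h : a = u
    · subst h; simp [hlt]
    · have hne : u ≠ a := fun hh => h hh.symm
      simp [h, hne]

theorem pvHit_iff (bombs : List (List Int)) (a b : Nat) :
    pvHit bombs a b = true ↔
      ((pvUnpack3 (bombs.getD a [])).1 - (pvUnpack3 (bombs.getD b [])).1) ^ 2 +
        ((pvUnpack3 (bombs.getD a [])).2.1 - (pvUnpack3 (bombs.getD b [])).2.1) ^ 2 ≤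
      (pvUnpack3 (bombs.getD a [])).2.2 ^ 2 := by
  simp [pvHit, pow_two]

theorem pvGraphBody_length (bombs : List (List Int)) (g : List (List Nat)) (i j : Nat) :
    (pvGraphBody bombs g i j).length = g.length := by
  simp only [pvGraphBody]
  split
  · split <;> split <;> simp [pvAddEdge_length]
  · rfl

theorem pvGraphBody_mem (bombs : List (List Int)) (g : List (List Nat)) (i j u v : Nat) :
    v ∈ (pvGraphBody bombs g i j).getD u [] ↔
      v ∈ g.getD u [] ∨ (i < j ∧
        ((u = i ∧ i < g.length ∧ v = j ∧ pvHit bombs i j = true) ∨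
         (u = j ∧ j < g.length ∧ v = i ∧ pvHit bombs j i = true))) := by
  have hd : ∀ a b : ℤ, (a - b) ^ 2 = (b - a) ^ 2 := fun a b => by ring
  simp only [pvGraphBody]
  by_cases hij : i < j
  · simp only [hij, if_true, true_and]
    rw [pvHit_iff, pvHit_iff, hd ((pvUnpack3 (bombs.getD j [])).1),
        hd ((pvUnpack3 (bombs.getD j [])).2.1)]
    split_ifs with h1 h2 h2 <;>
      (try simp only [pvAddEdge_mem, pvAddEdge_length]) <;> tauto
  · simp [hij]

theorem pvInner_length (bombs : List (List Int)) (i : Nat) :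
    ∀ (J : List Nat) (g : List (List Nat)),
      (J.foldl (fun g j => pvGraphBody bombs g i j) g).length = g.length := by
  intro J
  induction J with
  | nil => intro g; rfl
  | cons j J ih => intro g; rw [List.foldl_cons, ih, pvGraphBody_length]

theorem pvInner_mem (bombs : List (List Int)) (i : Nat) :
    ∀ (J : List Nat) (g : List (List Nat)) (u v : Nat),
      v ∈ (J.foldl (fun g j => pvGraphBody bombs g i j) g).getD u [] ↔
        v ∈ g.getD u [] ∨ ∃ j ∈ J, i < j ∧
          ((u = i ∧ i < g.length ∧ v = j ∧ pvHit bombs i j = true) ∨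
           (u = j ∧ j < g.length ∧ v = i ∧ pvHit bombs j i = true)) := by
  intro J
  induction J with
  | nil => intro g u v; simp
  | cons j J ih =>
      intro g u v
      rw [List.foldl_cons, ih, pvGraphBody_mem]
      simp only [List.exists_mem_cons_iff, pvGraphBody_length]
      exact or_assoc

theorem pvOuter_mem (bombs : List (List Int)) (J : List Nat) :
    ∀ (I : List Nat) (g : List (List Nat)) (u v : Nat),
      v ∈ (I.foldl (fun g i => J.foldl (fun g j => pvGraphBody bombs g i j) g) g).getD u [] ↔
        v ∈ g.getD u [] ∨ ∃ i ∈ I, ∃ j ∈ J, i < j ∧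
          ((u = i ∧ i < g.length ∧ v = j ∧ pvHit bombs i j = true) ∨
           (u = j ∧ j < g.length ∧ v = i ∧ pvHit bombs j i = true)) := by
  intro I
  induction I with
  | nil => intro g u v; simp
  | cons i I ih =>
      intro g u v
      rw [List.foldl_cons, ih, pvInner_mem]
      simp only [List.exists_mem_cons_iff, pvInner_length]
      exact or_assoc

-- characterization of A's graph
theorem pvGraph_mem (bombs : List (List Int)) (u v : Nat) :
    v ∈ (pvGraph bombs).getD u [] ↔
      u < bombs.length ∧ v < bombs.length ∧ u ≠ v ∧ pvHit bombs u v = true := by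
  have h0 : ∀ w : Nat, (List.replicate bombs.length ([] : List Nat)).getD w [] = [] := by
    intro w
    rcases lt_or_ge w bombs.length with h | h
    · simp [List.getD_eq_getElem?_getD, h]
    · rw [List.getD_eq_getElem?_getD, List.getElem?_eq_none (by simpa using h)]
      rfl
  rw [pvGraph]
  rw [pvOuter_mem]
  simp only [h0, List.not_mem_nil, false_or, List.mem_range, List.length_replicate]
  constructor
  · rintro ⟨i, hi, j, hj, hij, ⟨hu, _, hv, hh⟩ | ⟨hu, _, hv, hh⟩⟩ <;>
      subst hu <;> subst hv <;> exact ⟨by omega, by omega, by omega, hh⟩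
  · rintro ⟨hu, hv, hne, hh⟩
    rcases lt_or_gt_of_ne hne with hlt | hgt
    · exact ⟨u, hu, v, hv, hlt, Or.inl ⟨rfl, hu, rfl, hh⟩⟩
    · exact ⟨v, hv, u, hu, hgt, Or.inr ⟨rfl, hu, rfl, hh⟩⟩

-- basic pvStep facts
theorem pvStep_subset (g : List (List Nat)) (n : Nat) (S : Finset ℕ) : S ⊆ pvStep g n S :=
  Finset.subset_union_left

theorem pvIter_subset_range (g : List (List Nat)) {n x : Nat} (hx : x < n) :
    ∀ k, (pvStep g n)^[k] {x} ⊆ Finset.range n := by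
  intro k
  induction k with
  | zero => simpa using hx
  | succ k ih =>
      rw [Function.iterate_succ_apply']
      intro y hy
      rcases Finset.mem_union.1 hy with h | h
      · exact ih h
      · exact (Finset.mem_filter.1 h).1

theorem pvC_subset_range (g : List (List Nat)) {n x : Nat} (hx : x < n) :
    pvC g n x ⊆ Finset.range n := pvIter_subset_range g hx n

theorem pvC_mem_self (g : List (List Nat)) (n x : Nat) : x ∈ pvC g n x := by
  have : ∀ k, x ∈ (pvStep g n)^[k] {x} := by
    intro k
    induction k with
    | zero => simp
    | succ k ih => rw [Function.iterate_succ_apply']; exact pvStep_subset g n _ ih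
  exact this n

theorem pvC_fixed (g : List (List Nat)) {n x : Nat} (hx : x < n) :
    pvStep g n (pvC g n x) = pvC g n x := by
  have key : ∀ k, pvStep g n ((pvStep g n)^[k] {x}) = (pvStep g n)^[k] {x} ∨
      k + 1 ≤ ((pvStep g n)^[k] {x}).card := by
    intro k
    induction k with
    | zero => right; simp
    | succ k ih =>
        by_cases hcl : pvStep g n ((pvStep g n)^[k+1] {x}) = (pvStep g n)^[k+1] {x}
        · exact Or.inl hcl
        · right
          rcases ih with hcl' | hcard
          · exfalso
            apply hcl
            rw [Function.iterate_succ_apply', hcl', hcl']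
          · have hsub : (pvStep g n)^[k] {x} ⊆ (pvStep g n)^[k+1] {x} := by
              rw [Function.iterate_succ_apply']; exact pvStep_subset g n _
            have hne : (pvStep g n)^[k] {x} ≠ (pvStep g n)^[k+1] {x} := by
              intro he
              apply hcl
              have he2 : pvStep g n ((pvStep g n)^[k] {x}) = (pvStep g n)^[k] {x} := by
                conv_lhs => rw [← Function.iterate_succ_apply' (pvStep g n) k ({x} : Finset ℕ)]
                exact he.symm
              rw [Function.iterate_succ_apply', he2, he2]
            have := Finset.card_lt_card (Finset.ssubset_iff_subset_ne.2 ⟨hsub, hne⟩)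
            omega
  rcases key n with h | h
  · exact h
  · exfalso
    have := Finset.card_le_card (pvIter_subset_range g hx n)
    simp [Finset.card_range] at this
    omega

theorem pvC_closed (g : List (List Nat)) {n x u v : Nat} (hx : x < n)
    (hu : u ∈ pvC g n x) (hv : v ∈ g.getD u []) (hvn : v < n) : v ∈ pvC g n x := by
  rw [← pvC_fixed g hx]
  exact Finset.mem_union.2 (Or.inr (Finset.mem_filter.2 ⟨Finset.mem_range.2 hvn, u, hu, hv⟩))

theorem pvC_least (g : List (List Nat)) {n x : Nat} (T : Finset ℕ)
    (hT : ∀ u ∈ T, ∀ v ∈ g.getD u [], v < n → v ∈ T) (hxT : x ∈ T) :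
    pvC g n x ⊆ T := by
  have : ∀ k, (pvStep g n)^[k] {x} ⊆ T := by
    intro k
    induction k with
    | zero => simpa using hxT
    | succ k ih =>
        rw [Function.iterate_succ_apply']
        intro y hy
        rcases Finset.mem_union.1 hy with h | h
        · exact ih h
        · rcases Finset.mem_filter.1 h with ⟨hyr, u, huS, hyu⟩
          exact hT u (ih huS) y hyu (Finset.mem_range.1 hyr)
  exact this n

-- the inner for-loop of A's DFS preserves the invariant
theorem pvFold_inv (g : List (List Nat)) (n : Nat) (C : Finset ℕ)
    (hCr : ∀ y ∈ C, y < n) :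
    ∀ (l : List Nat) (ans : Int) (seen : PySem.Set Nat) (rest : List Nat),
    seen.Nodup → ans = (seen.length : Int) → (∀ y ∈ rest, y ∈ seen) →
    (∀ y ∈ seen, y ∈ C) → (∀ v ∈ l, v ∈ C) →
    (let st := l.foldl
        (fun (acc : Int × PySem.Set Nat × List Nat) v =>
          if PySem.Set.contains acc.2.1 v then acc
          else (acc.1 + 1, PySem.Set.add acc.2.1 v, v :: acc.2.2))
        (ans, seen, rest)
     st.2.1.Nodup ∧ st.1 = (st.2.1.length : Int) ∧
     (∀ y ∈ seen, y ∈ st.2.1) ∧ (∀ y ∈ st.2.1, y ∈ C) ∧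
     (∀ y ∈ st.2.2, y ∈ st.2.1) ∧ (∀ v ∈ l, v ∈ st.2.1) ∧
     (∀ w ∈ st.2.1, w ∉ st.2.2 → (w ∈ seen ∧ w ∉ rest)) ∧
     st.2.2.length + (n - st.2.1.length) ≤ rest.length + (n - seen.length)) := by
  intro l
  induction l with
  | nil =>
      intro ans seen rest hnd hans hrs hsC _
      exact ⟨hnd, hans, fun y hy => hy, hsC, hrs, by simp, fun w hw hnw => ⟨hw, hnw⟩, le_refl _⟩
  | cons v l ih =>
      intro ans seen rest hnd hans hrs hsC hlC
      simp only [List.foldl_cons]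
      by_cases hv : v ∈ seen
      · have hc : PySem.Set.contains seen v = true := (PySem.Set.contains_iff seen v).2 hv
        rw [hc, if_pos rfl]
        rcases ih ans seen rest hnd hans hrs hsC (fun w hw => hlC w (List.mem_cons_of_mem v hw))
          with ⟨c1, c2, c3, c4, c5, c6, c7, c8⟩
        refine ⟨c1, c2, c3, c4, c5, ?_, c7, c8⟩
        intro w hw
        rcases List.mem_cons.1 hw with h | h
        · subst h; exact c3 w hv
        · exact c6 w h
      · have hc : PySem.Set.contains seen v = false := by
          rcases hcc : PySem.Set.contains seen v with _ | _
          · rfl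
          · exact absurd ((PySem.Set.contains_iff seen v).1 hcc) hv
        rw [hc]
        simp only [Bool.false_eq_true, if_false]
        have hvC : v ∈ C := hlC v List.mem_cons_self
        have hlen : seen.length < n := by
          have hsubF : seen.toFinset ⊆ C := fun y hy => hsC y (List.mem_toFinset.1 hy)
          have hvnot : v ∉ seen.toFinset := fun hvv => hv (List.mem_toFinset.1 hvv)
          have hne : seen.toFinset ≠ C := fun he => hvnot (he ▸ hvC)
          have h1 := Finset.card_lt_card (Finset.ssubset_iff_subset_ne.2 ⟨hsubF, hne⟩)
          have h2 : C.card ≤ n := by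
            have := Finset.card_le_card (fun y hy => Finset.mem_range.2 (hCr y hy))
            simpa [Finset.card_range] using this
          have h3 := List.toFinset_card_of_nodup hnd
          omega
        have hadd : PySem.Set.add seen v = seen ++ [v] := PySem.Set.add_of_not_mem hv
        have hnd' : (PySem.Set.add seen v).Nodup := PySem.Set.nodup_add seen v hnd
        have hlen' : (PySem.Set.add seen v).length = seen.length + 1 := by
          rw [hadd]; simp
        have hmem' : ∀ y, y ∈ PySem.Set.add seen v ↔ y ∈ seen ∨ y = v :=
          fun y => PySem.Set.mem_add seen v y
        rcases ih (ans + 1) (PySem.Set.add seen v) (v :: rest) hnd'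
            (by rw [hlen']; push_cast; omega)
            (by
              intro y hy
              rcases List.mem_cons.1 hy with h | h
              · subst h; exact (hmem' y).2 (Or.inr rfl)
              · exact (hmem' y).2 (Or.inl (hrs y h)))
            (by
              intro y hy
              rcases (hmem' y).1 hy with h | h
              · exact hsC y h
              · subst h; exact hvC)
            (fun w hw => hlC w (List.mem_cons_of_mem v hw))
          with ⟨c1, c2, c3, c4, c5, c6, c7, c8⟩
        refine ⟨c1, c2, ?_, c4, c5, ?_, ?_, ?_⟩
        · intro y hy
          exact c3 y ((hmem' y).2 (Or.inl hy))
        · intro w hw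
          rcases List.mem_cons.1 hw with h | h
          · subst h; exact c3 w ((hmem' w).2 (Or.inr rfl))
          · exact c6 w h
        · intro w hw hnw
          rcases c7 w hw hnw with ⟨hw1, hw2⟩
          have hwv : w ≠ v := fun he => hw2 (he ▸ List.mem_cons_self)
          rcases (hmem' w).1 hw1 with h | h
          · exact ⟨h, fun hr => hw2 (List.mem_cons_of_mem v hr)⟩
          · exact absurd h hwv
        · rw [hlen'] at c8
          simp only [List.length_cons] at c8
          omega

-- A's DFS computes the size of the n-fold expansion of {x}
theorem pvFnLoop_eq (g : List (List Nat)) {n x : Nat} (hx : x < n)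
    (hgr : ∀ u v : Nat, v ∈ g.getD u [] → v < n) :
    ∀ (fuel : Nat) (stack : List Nat) (seen : PySem.Set Nat) (ans : Int),
    seen.Nodup → (∀ y ∈ stack, y ∈ seen) → (∀ y ∈ seen, y ∈ pvC g n x) →
    (∀ u ∈ seen, u ∉ stack → ∀ v ∈ g.getD u [], v ∈ seen) →
    x ∈ seen → ans = (seen.length : Int) →
    stack.length + (n - seen.length) < fuel →
    pvFnLoop g fuel stack seen ans = ((pvC g n x).card : Int) := by
  intro fuel
  induction fuel with
  | zero => intro stack seen ans _ _ _ _ _ _ hfuel; omega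
  | succ fuel ih =>
      intro stack seen ans hnd hss hsC hcl hxs hans hfuel
      cases stack with
      | nil =>
          have hsub1 : pvC g n x ⊆ seen.toFinset :=
            pvC_least g seen.toFinset
              (fun u hu v hv _ => List.mem_toFinset.2
                (hcl u (List.mem_toFinset.1 hu) (List.not_mem_nil) v hv))
              (List.mem_toFinset.2 hxs)
          have hsub2 : seen.toFinset ⊆ pvC g n x :=
            fun y hy => hsC y (List.mem_toFinset.1 hy)
          have heq : seen.toFinset = pvC g n x := Finset.Subset.antisymm hsub2 hsub1
          show ans = ((pvC g n x).card : Int)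
          rw [← heq, List.toFinset_card_of_nodup hnd, hans]
      | cons u rest =>
          show pvFnLoop g (fuel + 1) (u :: rest) seen ans = ((pvC g n x).card : Int)
          rw [pvFnLoop]
          have huC : u ∈ pvC g n x := hsC u (hss u List.mem_cons_self)
          have hCr : ∀ y ∈ pvC g n x, y < n :=
            fun y hy => Finset.mem_range.1 (pvC_subset_range g hx hy)
          rcases pvFold_inv g n (pvC g n x) hCr (g.getD u []) ans seen rest hnd hans
              (fun y hy => hss y (List.mem_cons_of_mem u hy)) hsC
              (fun v hv => pvC_closed g hx huC hv (hgr u v hv))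
            with ⟨c1, c2, c3, c4, c5, c6, c7, c8⟩
          apply ih _ _ _ c1 c5 c4 ?_ (c3 x hxs) c2 ?_
          · intro w hw hwns v hv
            by_cases hwu : w = u
            · subst hwu; exact c6 v hv
            · rcases c7 w hw hwns with ⟨hw1, hw2⟩
              have : w ∉ u :: rest := by
                intro hmem
                rcases List.mem_cons.1 hmem with h | h
                · exact hwu h
                · exact hw2 h
              exact c3 v (hcl w hw1 this v hv)
          · simp only [List.length_cons] at hfuel
            omega

theorem pvFn_eq (bombs : List (List Int)) {x : Nat} (hx : x < bombs.length) :
    pvFn (pvGraph bombs) (bombs.length + 1) x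
      = ((pvC (pvGraph bombs) bombs.length x).card : Int) := by
  have hgr : ∀ u v : Nat, v ∈ (pvGraph bombs).getD u [] → v < bombs.length :=
    fun u v hv => ((pvGraph_mem bombs u v).1 hv).2.1
  have h1 : PySem.Set.ofList [x] = ([x] : List Nat) := rfl
  rw [pvFn, h1]
  apply pvFnLoop_eq (pvGraph bombs) hx hgr
  · exact List.nodup_singleton x
  · intro y hy; exact hy
  · intro y hy
    have hyx := List.mem_singleton.1 hy
    subst hyx
    exact pvC_mem_self (pvGraph bombs) bombs.length y
  · intro u hu hnu
    exact absurd hu hnu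
  · exact List.mem_singleton.2 rfl
  · rfl
  · simp only [List.length_singleton]
    omega

-- B-side: neighbour sets
theorem pvNbr_mem (bombs : List (List Int)) {u : Nat} (hu : u < bombs.length) (v : Nat) :
    v ∈ (pvNbr bombs).getD u [] ↔ v < bombs.length ∧ pvHit bombs u v = true := by
  have h : (pvNbr bombs).getD u []
      = PySem.Set.ofList ((List.range bombs.length).filter (fun j => pvHit bombs u j)) := by
    simp [pvNbr, List.getD_eq_getElem?_getD, hu]
  rw [h, PySem.Set.mem_ofList]
  simp [List.mem_filter]

-- one saturation round, as a fold invariant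
theorem pvRound_fold (nbr : List (PySem.Set Nat)) (s : PySem.Set Nat) :
    ∀ (l : List Nat) (t : PySem.Set Nat), t.Nodup →
    (let r := l.foldl
        (fun t u => if PySem.Set.contains s u then PySem.Set.union t (nbr.getD u []) else t) t
     r.Nodup ∧ ∀ y, y ∈ r ↔ y ∈ t ∨ ∃ u ∈ l, u ∈ s ∧ y ∈ nbr.getD u []) := by
  intro l
  induction l with
  | nil => intro t ht; exact ⟨ht, by simp⟩
  | cons u l ih =>
      intro t ht
      simp only [List.foldl_cons]
      by_cases hu : u ∈ s
      · have hc : PySem.Set.contains s u = true := (PySem.Set.contains_iff s u).2 hu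
        rw [hc, if_pos rfl]
        rcases ih (PySem.Set.union t (nbr.getD u [])) (PySem.Set.nodup_union _ _ ht) with ⟨h1, h2⟩
        refine ⟨h1, fun y => ?_⟩
        rw [h2 y, PySem.Set.mem_union, List.exists_mem_cons_iff]
        tauto
      · have hc : PySem.Set.contains s u = false := by
          rcases hcc : PySem.Set.contains s u with _ | _
          · rfl
          · exact absurd ((PySem.Set.contains_iff s u).1 hcc) hu
        rw [hc]
        simp only [Bool.false_eq_true, if_false]
        rcases ih t ht with ⟨h1, h2⟩
        refine ⟨h1, fun y => ?_⟩
        rw [h2 y, List.exists_mem_cons_iff]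
        tauto

-- a round is exactly pvStep on the underlying finsets
theorem pvRound_eq_step (bombs : List (List Int)) (s : PySem.Set Nat) (hs : s.Nodup) :
    (pvRound (pvNbr bombs) bombs.length s).Nodup ∧
    (pvRound (pvNbr bombs) bombs.length s).toFinset
      = pvStep (pvGraph bombs) bombs.length s.toFinset := by
  rcases pvRound_fold (pvNbr bombs) s (List.range bombs.length) s hs with ⟨h1, h2⟩
  refine ⟨h1, ?_⟩
  ext y
  rw [List.mem_toFinset]
  show y ∈ pvRound (pvNbr bombs) bombs.length s ↔ _
  rw [pvRound, h2 y]
  simp only [pvStep, Finset.mem_union, Finset.mem_filter, List.mem_toFinset,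
    Finset.mem_range, List.mem_range]
  constructor
  · rintro (hy | ⟨u, hun, hus, hyn⟩)
    · exact Or.inl hy
    · rcases (pvNbr_mem bombs hun y).1 hyn with ⟨hyl, hhit⟩
      by_cases huy : u = y
      · subst huy; exact Or.inl hus
      · exact Or.inr ⟨hyl, u, hus, (pvGraph_mem bombs u y).2 ⟨hun, hyl, huy, hhit⟩⟩
  · rintro (hy | ⟨hyn, u, hus, hyu⟩)
    · exact Or.inl hy
    · rcases (pvGraph_mem bombs u y).1 hyu with ⟨hun, hyl, _, hhit⟩
      exact Or.inr ⟨u, hun, hus, (pvNbr_mem bombs hun y).2 ⟨hyl, hhit⟩⟩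

theorem pvSaturate_eq (bombs : List (List Int)) :
    ∀ (l : List Nat) (s : PySem.Set Nat), s.Nodup →
    (let r := l.foldl (fun s _ => pvRound (pvNbr bombs) bombs.length s) s
     r.Nodup ∧ r.toFinset
        = (pvStep (pvGraph bombs) bombs.length)^[l.length] s.toFinset) := by
  intro l
  induction l with
  | nil => intro s hs; exact ⟨hs, rfl⟩
  | cons a l ih =>
      intro s hs
      simp only [List.foldl_cons, List.length_cons]
      rcases pvRound_eq_step bombs s hs with ⟨h1, h2⟩
      rcases ih (pvRound (pvNbr bombs) bombs.length s) h1 with ⟨h3, h4⟩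
      refine ⟨h3, ?_⟩
      rw [h4, h2, ← Function.iterate_succ_apply]

-- max over a nonempty list of positive ints, two ways
theorem pvMax?_cons (a x : Int) (t : List Int) :
    PySem.List.max? (a :: x :: t) (fun v => v) = PySem.List.max? (max a x :: t) (fun v => v) := by
  simp only [PySem.List.max?, List.foldl_cons]
  congr 1
  by_cases h : a < x
  · rw [max_eq_right (le_of_lt h)]; simp [h]
  · rw [max_eq_left (by omega)]; simp [h]

theorem pvMax?_eq_foldl : ∀ (t : List Int) (a : Int),
    PySem.List.max? (a :: t) (fun v => v) = some (t.foldl max a) := by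
  intro t
  induction t with
  | nil => intro a; rfl
  | cons x t ih =>
      intro a
      rw [pvMax?_cons, ih (max a x), List.foldl_cons]

theorem pvMax_eq (l : List Int) (hne : l ≠ []) (hpos : ∀ y ∈ l, 1 ≤ y) :
    (PySem.List.max? l (fun v => v)).getD 0 = l.foldl max 0 := by
  cases l with
  | nil => exact absurd rfl hne
  | cons h t =>
      have h0 : max (0 : Int) h = h := max_eq_right (by
        have := hpos h List.mem_cons_self; omega)
      rw [pvMax?_eq_foldl t h, List.foldl_cons, h0]
      rfl

-- ===== VERDICT (by name: the statement is the Claim_ definition above) =====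
theorem maximumDetonationInt_spec : Claim_equal_maximumDetonationInt := by
  intro bombs _ hpre
  unfold Spec_maximumDetonationInt
  rcases hpre with ⟨hne, _⟩
  have hn : 0 < bombs.length := List.length_pos_iff.2 hne
  rw [maximumDetonationInt, maximumDetonationInt_alt]
  have hA : (List.range bombs.length).map (fun x => pvFn (pvGraph bombs) (bombs.length + 1) x)
      = (List.range bombs.length).map
          (fun x => ((pvC (pvGraph bombs) bombs.length x).card : Int)) :=
    List.map_congr_left (fun x hx => pvFn_eq bombs (List.mem_range.1 hx))
  rw [hA]
  have hB : (List.range bombs.length).foldl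
      (fun best x =>
        max best (PySem.Set.len
          ((List.range bombs.length).foldl
            (fun s _ => pvRound (pvNbr bombs) bombs.length s) (PySem.Set.ofList [x]))))
      0
      = (List.range bombs.length).foldl
          (fun best x => max best ((pvC (pvGraph bombs) bombs.length x).card : Int)) 0 := by
    apply PySem.List.foldl_congr_mem
    intro acc x hx
    rcases pvSaturate_eq bombs (List.range bombs.length) (PySem.Set.ofList [x])
        (List.nodup_singleton x) with ⟨h1, h2⟩
    have hxf : (PySem.Set.ofList [x] : List Nat).toFinset = ({x} : Finset ℕ) := by
      show ([x] : List Nat).toFinset = {x}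
      simp
    rw [hxf, List.length_range] at h2
    have : PySem.Set.len
        ((List.range bombs.length).foldl
          (fun s _ => pvRound (pvNbr bombs) bombs.length s) (PySem.Set.ofList [x]))
        = ((pvC (pvGraph bombs) bombs.length x).card : Int) := by
      rw [PySem.Set.len, ← List.toFinset_card_of_nodup h1, h2]
      rfl
    rw [this]
  rw [hB, ← List.foldl_map]
  apply pvMax_eq
  · simp only [ne_eq, List.map_eq_nil_iff, List.range_eq_nil]
    omega
  · intro y hy
    rcases List.mem_map.1 hy with ⟨x, hxr, rfl⟩
    have : 0 < (pvC (pvGraph bombs) bombs.length x).card :=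
      Finset.card_pos.2 ⟨x, pvC_mem_self _ _ _⟩
    omega
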